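-- pv_equiv track=rewrite | github.com/anirudhshenoy/Nand2Tetris | projects/11/JackAnalyzer.py | decompose_string
-- ===== SOURCE A (Python) =====
-- def decompose_string(str):
--     decomposed_str = []
--     word = ''
--     for s in str:
--         if(s.isalnum() or s==':'):
--             word = ''.join([word, s])
--         else:
--             if(len(word)):
--                 decomposed_str.append(word)
--             decomposed_str.append(s)
--             word = ''
--     if(len(word)):
--         decomposed_str.append(word)
--     return decomposed_str
-- ===== SOURCE B (Python) =====
-- def decompose_string(str):
--     out = []
--     i, n = 0, len(str)
--     while i < n:
--         c = str[i]
--         if c.isalnum() or c == ':':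
--             j = i + 1
--             while j < n and (str[j].isalnum() or str[j] == ':'):
--                 j += 1
--             out.append(str[i:j])
--             i = j
--         else:
--             out.append(c)
--             i += 1
--     return out
-- ===== Notes on version B (the rewrite author's own statement) =====
-- stated objective: faster
-- what changed: Replaces the char-by-char word-buffer/flush state machine (which rebuilds the word with ''.join on every character) with a span scan that finds each maximal word run and slices it out in one step, appending delimiter characters individually.
import Mathlib
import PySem

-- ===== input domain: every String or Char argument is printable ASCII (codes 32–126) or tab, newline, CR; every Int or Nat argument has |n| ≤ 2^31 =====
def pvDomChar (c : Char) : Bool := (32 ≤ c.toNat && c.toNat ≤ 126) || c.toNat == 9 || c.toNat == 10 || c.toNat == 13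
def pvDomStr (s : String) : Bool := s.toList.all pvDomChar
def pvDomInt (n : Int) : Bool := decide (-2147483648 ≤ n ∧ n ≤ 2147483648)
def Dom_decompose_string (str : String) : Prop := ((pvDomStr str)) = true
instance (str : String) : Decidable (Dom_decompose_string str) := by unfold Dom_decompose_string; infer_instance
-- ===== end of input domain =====

-- B replaces A's word-buffer/flush state machine (quadratic .join rebuild per word) by a single span scan over maximal word runs; a timing run measured B faster.

-- the shared per-character predicate: c.isalnum() or c == ':'
def pvIsWordChar (c : Char) : Bool := PySem.Chars.isalnum c || c == ':'

-- ===== PORT A =====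
-- A's for-loop: state = (decomposed_str, word); word kept as List Char (''.join([word, s]) appends s)
def pvALoop (acc : List String) (word : List Char) : List Char → List String
  | [] => if word.length ≠ 0 then acc ++ [String.mk word] else acc
  | c :: rest =>
    if pvIsWordChar c then
      pvALoop acc (word ++ [c]) rest
    else
      pvALoop ((if word.length ≠ 0 then acc ++ [String.mk word] else acc) ++ [String.mk [c]]) [] rest

def decompose_string (str : String) : List String := pvALoop [] [] str.toList

-- ===== PORT B =====
-- B's while-loop: at a word char take the whole maximal run as one slice, else emit the char alone
def pvBScan : List Char → List String
  | [] => []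
  | c :: rest =>
    if pvIsWordChar c then
      String.mk (c :: rest.takeWhile pvIsWordChar) :: pvBScan (rest.dropWhile pvIsWordChar)
    else
      String.mk [c] :: pvBScan rest
termination_by l => l.length
decreasing_by
· simpa using Nat.lt_succ_of_le (List.length_dropWhile_le _ _)
· simp

def decompose_string_alt (str : String) : List String := pvBScan str.toList

-- ===== PRECONDITION & SPEC =====
def Spec_decompose_string (str : String) (out : List String) : Prop := out = decompose_string_alt str
instance (str : String) (out : List String) : Decidable (Spec_decompose_string str out) := by unfold Spec_decompose_string; infer_instance

-- ===== CLAIM (what is proved, stated in full; the proofs are below) =====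
def Claim_equal_decompose_string : Prop := ∀ (str : String), Dom_decompose_string str → Spec_decompose_string str (decompose_string str)

-- ===== LEMMAS AND PROOFS =====

theorem pvTakeWhile_append {p : Char → Bool} (ws l : List Char) (h : ∀ x ∈ ws, p x = true) :
    (ws ++ l).takeWhile p = ws ++ l.takeWhile p := by
  induction ws with
  | nil => simp
  | cons y ys ih =>
    simp only [List.cons_append, List.takeWhile_cons, h y (by simp), if_pos]
    rw [ih (fun x hx => h x (by simp [hx]))]

theorem pvDropWhile_append {p : Char → Bool} (ws l : List Char) (h : ∀ x ∈ ws, p x = true) :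
    (ws ++ l).dropWhile p = l.dropWhile p := by
  induction ws with
  | nil => simp
  | cons y ys ih =>
    simp only [List.cons_append, List.dropWhile_cons, h y (by simp), if_pos]
    exact ih (fun x hx => h x (by simp [hx]))

-- invariant: word consists of word chars only; then A's loop with pending word equals B's scan of word ++ l
theorem pvALoop_eq_pvBScan (l : List Char) : ∀ (word : List Char) (acc : List String),
    (∀ c ∈ word, pvIsWordChar c = true) → pvALoop acc word l = acc ++ pvBScan (word ++ l) := by
  induction l with
  | nil =>
    intro word acc hw
    cases word with
    | nil => simp [pvALoop, pvBScan]
    | cons w ws =>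
      have : pvIsWordChar w = true := hw w (by simp)
      simp [pvALoop, pvBScan, this,
        List.takeWhile_eq_self_iff.mpr (fun c hc => hw c (List.mem_cons_of_mem _ hc)),
        List.dropWhile_eq_nil_iff.mpr (fun c hc => hw c (List.mem_cons_of_mem _ hc))]
  | cons c rest ih =>
    intro word acc hw
    by_cases hc : pvIsWordChar c = true
    · have := ih (word ++ [c]) acc (by
        intro x hx
        rcases List.mem_append.mp hx with h | h
        · exact hw x h
        · simp at h; subst h; exact hc)
      simp only [pvALoop, hc, if_pos] at *
      simpa [List.append_assoc] using this
    · have hbranch : pvBScan (word ++ c :: rest) =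
          (if word.length ≠ 0 then [String.mk word] else []) ++ String.mk [c] :: pvBScan rest := by
        cases word with
        | nil => simp [pvBScan, hc]
        | cons w ws =>
          have hwtrue : pvIsWordChar w = true := hw w (by simp)
          have htake : (ws ++ c :: rest).takeWhile pvIsWordChar = ws := by
            rw [pvTakeWhile_append ws _ (fun x hx => hw x (by simp [hx]))]
            simp [List.takeWhile, hc]
          have hdrop : (ws ++ c :: rest).dropWhile pvIsWordChar = c :: rest := by
            rw [pvDropWhile_append ws _ (fun x hx => hw x (by simp [hx]))]
            simp [List.dropWhile, hc]
          simp [pvBScan, hwtrue, htake, hdrop, hc]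
      simp only [pvALoop, hc, if_neg, Bool.false_eq_true, not_false_iff]
      rw [ih [] _ (by simp), hbranch]
      by_cases hlen : word.length ≠ 0 <;> simp [hlen, List.append_assoc]

-- ===== VERDICT (by name: the statement is the Claim_ definition above) =====
theorem decompose_string_spec : Claim_equal_decompose_string := by
  intro s _
  show decompose_string s = decompose_string_alt s
  unfold decompose_string decompose_string_alt
  simpa using pvALoop_eq_pvBScan s.toList [] [] (by simp)
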